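-- pv_equiv track=rewrite | github.com/budgierless/vibeship-spark-intelligence | benchmarks/memory_retrieval_ab.py | extract_agentic_queries
-- ===== SOURCE A (Python) =====
-- from typing import Any, Dict, List, Optional, Sequence, Tuple
--
-- def extract_agentic_queries(context: str, limit: int = 3) -> List[str]:
--     tokens = []
--     skip = {
--         "with",
--         "from",
--         "that",
--         "this",
--         "into",
--         "have",
--         "should",
--         "would",
--         "could",
--         "where",
--         "when",
--         "while",
--     }
--     for raw in context.lower().replace("/", " ").replace("_", " ").split():
--         token = raw.strip(".,:;()[]{}'\"`")
--         if len(token) < 4 or token in skip: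
--             continue
--         if not any(ch.isalnum() for ch in token):
--             continue
--         tokens.append(token)
--
--     unique: List[str] = []
--     seen = set()
--     for token in tokens:
--         if token in seen:
--             continue
--         seen.add(token)
--         unique.append(token)
--         if len(unique) >= limit:
--             break
--
--     return [f"{token} failure pattern and fix" for token in unique]
-- ===== SOURCE B (Python) =====
-- from typing import List, Optional
--
-- _SKIP = {
--     "with", "from", "that", "this", "into", "have", "should",
--     "would", "could", "where", "when", "while",
-- }
--
-- def _clean(raw: str) -> Optional[str]:
--     token = raw.strip(".,:;()[]{}'\"`")
--     if len(token) >= 4 and token not in _SKIP and any(ch.isalnum() for ch in token):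
--         return token
--     return None
--
-- def extract_agentic_queries(context: str, limit: int = 3) -> List[str]:
--     # single fused pass: clean, dedup and format in one loop, no intermediate token list
--     out: List[str] = []
--     seen = set()
--     for raw in context.lower().replace("/", " ").replace("_", " ").split():
--         token = _clean(raw)
--         if token is None or token in seen:
--             continue
--         seen.add(token)
--         out.append(f"{token} failure pattern and fix")
--         if len(out) >= limit:
--             break
--     return out
-- ===== Notes on version B (the rewrite author's own statement) =====
-- stated objective: simpler
-- what changed: B fuses A's three phases (build a filtered token list, then a dedup-with-limit loop, then a format pass) into one streaming loop with an Option-returning clean helper that filters, dedups and formats each word as it is seen, stopping at the limit without ever materialising the intermediate token list.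
import Mathlib
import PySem

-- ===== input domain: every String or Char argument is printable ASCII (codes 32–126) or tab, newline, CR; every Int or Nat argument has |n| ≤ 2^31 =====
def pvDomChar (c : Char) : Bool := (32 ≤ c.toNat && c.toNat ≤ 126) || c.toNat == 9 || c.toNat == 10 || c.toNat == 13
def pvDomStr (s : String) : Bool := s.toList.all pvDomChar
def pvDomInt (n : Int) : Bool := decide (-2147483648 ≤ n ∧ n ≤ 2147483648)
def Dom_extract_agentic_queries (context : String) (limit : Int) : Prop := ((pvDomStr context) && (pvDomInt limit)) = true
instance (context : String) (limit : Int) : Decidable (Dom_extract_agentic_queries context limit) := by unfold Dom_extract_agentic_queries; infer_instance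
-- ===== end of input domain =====

-- B fuses A's three phases (filter-to-token-list, dedup-with-limit loop, format pass) into one
-- streaming loop with an Option-returning clean helper; same return value, objective: simpler.

-- ===== PORT A =====
def skipA : List String :=
  ["with", "from", "that", "this", "into", "have", "should",
   "would", "could", "where", "when", "while"]

-- first loop of A: build the filtered token list
def tokensLoopA : List String → List String → List String
  | [], acc => acc
  | raw :: rest, acc =>
    if PySem.Str.len (PySem.Str.stripChars raw ".,:;()[]{}'\"`") < 4 ∨
        PySem.Str.stripChars raw ".,:;()[]{}'\"`" ∈ skipA then tokensLoopA rest acc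
    else if ¬ ((PySem.Str.stripChars raw ".,:;()[]{}'\"`").toList.any PySem.Chars.isalnum) then
      tokensLoopA rest acc
    else tokensLoopA rest (acc ++ [PySem.Str.stripChars raw ".,:;()[]{}'\"`"])

-- second loop of A: dedup, stopping once limit is reached (break after append, as in A)
def dedupLoopA (limit : Int) : List String → List String → List String → List String
  | [], _, unique => unique
  | token :: rest, seen, unique =>
    if token ∈ seen then dedupLoopA limit rest seen unique
    else
      let seen' := seen ++ [token]
      let unique' := unique ++ [token]
      if limit ≤ (unique'.length : Int) then unique'
      else dedupLoopA limit rest seen' unique'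

def fmtA (token : String) : String :=
  String.ofList (token.toList ++ " failure pattern and fix".toList)

def extract_agentic_queries (context : String) (limit : Int) : List String :=
  let words := PySem.Str.split₀
    (PySem.Str.replace (PySem.Str.replace (PySem.Str.lower context) "/" " ") "_" " ")
  let tokens := tokensLoopA words []
  (dedupLoopA limit tokens [] []).map fmtA

-- ===== PORT B =====
def skipB : List String :=
  ["with", "from", "that", "this", "into", "have", "should",
   "would", "could", "where", "when", "while"]

def cleanB (raw : String) : Option String :=
  if 4 ≤ PySem.Str.len (PySem.Str.stripChars raw ".,:;()[]{}'\"`") ∧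
      PySem.Str.stripChars raw ".,:;()[]{}'\"`" ∉ skipB ∧
      (PySem.Str.stripChars raw ".,:;()[]{}'\"`").toList.any PySem.Chars.isalnum
  then some (PySem.Str.stripChars raw ".,:;()[]{}'\"`") else none

def fmtB (token : String) : String :=
  String.ofList (token.toList ++ " failure pattern and fix".toList)

-- the single fused loop of B
def scanB (limit : Int) : List String → List String → List String → List String
  | [], _, out => out
  | raw :: rest, seen, out =>
    match cleanB raw with
    | none => scanB limit rest seen out
    | some token =>
      if token ∈ seen then scanB limit rest seen out
      else
        let out' := out ++ [fmtB token]
        if limit ≤ (out'.length : Int) then out'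
        else scanB limit rest (seen ++ [token]) out'

def extract_agentic_queries_alt (context : String) (limit : Int) : List String :=
  scanB limit
    (PySem.Str.split₀
      (PySem.Str.replace (PySem.Str.replace (PySem.Str.lower context) "/" " ") "_" " "))
    [] []

-- ===== PRECONDITION & SPEC =====
def Spec_extract_agentic_queries (context : String) (limit : Int) (out : List String) : Prop := out = extract_agentic_queries_alt context limit
instance (context : String) (limit : Int) (out : List String) : Decidable (Spec_extract_agentic_queries context limit out) := by unfold Spec_extract_agentic_queries; infer_instance

-- ===== CLAIM (what is proved, stated in full; the proofs are below) =====
def Claim_equal_extract_agentic_queries : Prop := ∀ (context : String) (limit : Int), Dom_extract_agentic_queries context limit → Spec_extract_agentic_queries context limit (extract_agentic_queries context limit)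

-- ===== LEMMAS AND PROOFS =====

-- A's first loop is filterMap cleanB over the word list
lemma tokensLoopA_eq (ws acc : List String) :
    tokensLoopA ws acc = acc ++ ws.filterMap cleanB := by
  induction ws generalizing acc with
  | nil => simp [tokensLoopA]
  | cons raw rest ih =>
    have hAB : skipA = skipB := rfl
    simp only [tokensLoopA, List.filterMap_cons]
    set t := PySem.Str.stripChars raw ".,:;()[]{}'\"`" with ht
    by_cases hc : 4 ≤ PySem.Str.len t ∧ t ∉ skipB ∧ t.toList.any PySem.Chars.isalnum
    · have hcb : cleanB raw = some t := by rw [cleanB, ← ht, if_pos hc]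
      rw [hcb, if_neg (by rw [hAB]; push Not; exact ⟨by omega, hc.2.1⟩),
        if_neg (by simpa using hc.2.2), ih]
      simp
    · have hcb : cleanB raw = none := by rw [cleanB, ← ht, if_neg hc]
      rw [hcb]
      by_cases h1 : PySem.Str.len t < 4 ∨ t ∈ skipA
      · rw [if_pos h1]; exact ih acc
      · rw [if_neg h1]
        push Not at h1
        rw [if_pos (by
          intro hany
          exact hc ⟨by omega, by rw [← hAB]; exact h1.2, hany⟩)]
        exact ih acc

-- fused-loop invariant: B's scan over the words equals A's dedup over the filtered tokens, mapped
lemma scanB_eq (limit : Int) (ws seen unique : List String) :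
    scanB limit ws seen (unique.map fmtB) =
      (dedupLoopA limit (ws.filterMap cleanB) seen unique).map fmtA := by
  have hf : fmtB = fmtA := rfl
  induction ws generalizing seen unique with
  | nil => simp [scanB, dedupLoopA, hf]
  | cons raw rest ih =>
    cases hcb : cleanB raw with
    | none => simp only [scanB, hcb, List.filterMap_cons]; exact ih seen unique
    | some t =>
      simp only [scanB, hcb, List.filterMap_cons]
      by_cases hs : t ∈ seen
      · simp only [dedupLoopA, if_pos hs]; exact ih seen unique
      · simp only [dedupLoopA, if_neg hs]
        have hlen : ((unique.map fmtB ++ [fmtB t]).length : Int) = ((unique ++ [t]).length : Int) := by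
          simp
        by_cases hl : limit ≤ ((unique ++ [t]).length : Int)
        · rw [if_pos (by rw [hlen]; exact hl), if_pos hl]
          simp [hf]
        · rw [if_neg (by rw [hlen]; exact hl), if_neg hl]
          have := ih (seen ++ [t]) (unique ++ [t])
          simpa using this

theorem extract_agentic_queries_spec : Claim_equal_extract_agentic_queries := by
  intro context limit _
  simp only [Spec_extract_agentic_queries, extract_agentic_queries, extract_agentic_queries_alt]
  rw [tokensLoopA_eq, List.nil_append, ← scanB_eq]
  simp
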